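-- pv_equiv track=rewrite | github.com/JasperMunene/duotask-server | resources/mpesa_disbursment_resource.py | calculate_b2c_charge
-- ===== SOURCE A (Python) =====
-- def calculate_b2c_charge(amount):
--     tariff_table = [
--         (1, 49, 0), (50, 100, 0), (101, 500, 5), (501, 1000, 5),
--         (1001, 1500, 5), (1501, 2500, 9), (2501, 3500, 9), (3501, 5000, 9),
--         (5001, 7500, 11), (7501, 10000, 11), (10001, 15000, 11),
--         (15001, 20000, 11), (20001, 25000, 13), (25001, 30000, 13),
--         (30001, 35000, 13), (35001, 40000, 13), (40001, 45000, 13),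
--         (45001, 50000, 13), (50001, 70000, 13), (70001, 250000, 13),
--     ]
--     for min_amt, max_amt, fee in tariff_table:
--         if min_amt <= amount <= max_amt:
--             return fee
--     return None
-- ===== SOURCE B (Python) =====
-- def calculate_b2c_charge(amount):
--     if amount < 1 or amount > 250000:
--         return None
--     bounds = (100, 1500, 5000, 20000)
--     fees = (0, 5, 9, 11, 13)
--     lo, hi = 0, 4
--     while lo < hi:
--         mid = (lo + hi) // 2
--         if bounds[mid] < amount:
--             lo = mid + 1
--         else:
--             hi = mid
--     return fees[lo]
-- ===== Notes on version B (the rewrite author's own statement) =====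
-- stated objective: alternative
-- what changed: Replaces the linear scan over a 20-row (min,max,fee) table with a range check plus a hand-written binary search (bisect_left) over four fee-boundary values indexing a parallel fee tuple.
import Mathlib
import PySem

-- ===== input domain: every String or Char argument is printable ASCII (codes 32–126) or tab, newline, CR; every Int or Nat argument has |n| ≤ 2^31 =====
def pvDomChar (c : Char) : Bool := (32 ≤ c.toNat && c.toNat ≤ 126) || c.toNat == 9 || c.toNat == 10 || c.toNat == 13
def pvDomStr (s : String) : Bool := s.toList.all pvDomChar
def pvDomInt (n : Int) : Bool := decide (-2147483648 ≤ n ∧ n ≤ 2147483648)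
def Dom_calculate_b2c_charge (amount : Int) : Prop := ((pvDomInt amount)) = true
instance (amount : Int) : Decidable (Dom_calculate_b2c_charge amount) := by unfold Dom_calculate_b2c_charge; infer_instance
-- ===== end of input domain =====

-- B replaces the 20-row table scan with a range check plus a binary search (bisect_left) over four fee boundaries (alternative algorithm).


-- ===== PORT A =====
def pvTariffTable : List (Int × Int × Int) := [
  (1, 49, 0), (50, 100, 0), (101, 500, 5), (501, 1000, 5),
  (1001, 1500, 5), (1501, 2500, 9), (2501, 3500, 9), (3501, 5000, 9),
  (5001, 7500, 11), (7501, 10000, 11), (10001, 15000, 11),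
  (15001, 20000, 11), (20001, 25000, 13), (25001, 30000, 13),
  (30001, 35000, 13), (35001, 40000, 13), (40001, 45000, 13),
  (45001, 50000, 13), (50001, 70000, 13), (70001, 250000, 13)]

-- A's for-loop with early return over the table, step for step
def pvScanA (amount : Int) : List (Int × Int × Int) → Option Int
  | [] => none
  | (min_amt, max_amt, fee) :: rest =>
      if min_amt ≤ amount ∧ amount ≤ max_amt then some fee else pvScanA amount rest

def calculate_b2c_charge (amount : Int) : Option Int := pvScanA amount pvTariffTable

-- ===== PORT B =====
def pvBounds : List Int := [100, 1500, 5000, 20000]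
def pvFees : List Int := [0, 5, 9, 11, 13]

-- B's while-loop binary search (bisect_left); indices are always in range, so getD is exact for the tuple indexing
def pvBisect (amount : Int) (lo hi : Nat) : Nat :=
  if _h : lo < hi then
    let mid := (lo + hi) / 2
    if pvBounds.getD mid 0 < amount then pvBisect amount (mid + 1) hi
    else pvBisect amount lo mid
  else lo
termination_by hi - lo
decreasing_by all_goals omega

def calculate_b2c_charge_alt (amount : Int) : Option Int :=
  if amount < 1 ∨ amount > 250000 then none
  else some (pvFees.getD (pvBisect amount 0 4) 0)

-- ===== PRECONDITION & SPEC =====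
def Spec_calculate_b2c_charge (amount : Int) (out : Option Int) : Prop := out = calculate_b2c_charge_alt amount
instance (amount : Int) (out : Option Int) : Decidable (Spec_calculate_b2c_charge amount out) := by unfold Spec_calculate_b2c_charge; infer_instance

-- ===== CLAIM (what is proved, stated in full; the proofs are below) =====
def Claim_equal_calculate_b2c_charge : Prop := ∀ (amount : Int), Dom_calculate_b2c_charge amount → Spec_calculate_b2c_charge amount (calculate_b2c_charge amount)

-- ===== LEMMAS AND PROOFS =====
-- evaluation lemmas for A's scan: one per tariff row, and none outside [1,250000]
theorem pvA_row0 (a : Int) (h : 1 ≤ a ∧ a ≤ 49) : pvScanA a pvTariffTable = some 0 := by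
  simp only [pvTariffTable, pvScanA]
  rw [if_pos (by omega)]
theorem pvA_row1 (a : Int) (h : 50 ≤ a ∧ a ≤ 100) : pvScanA a pvTariffTable = some 0 := by
  simp only [pvTariffTable, pvScanA]
  rw [if_neg (by omega), if_pos (by omega)]
theorem pvA_row2 (a : Int) (h : 101 ≤ a ∧ a ≤ 500) : pvScanA a pvTariffTable = some 5 := by
  simp only [pvTariffTable, pvScanA]
  rw [if_neg (by omega), if_neg (by omega), if_pos (by omega)]
theorem pvA_row3 (a : Int) (h : 501 ≤ a ∧ a ≤ 1000) : pvScanA a pvTariffTable = some 5 := by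
  simp only [pvTariffTable, pvScanA]
  rw [if_neg (by omega), if_neg (by omega), if_neg (by omega), if_pos (by omega)]
theorem pvA_row4 (a : Int) (h : 1001 ≤ a ∧ a ≤ 1500) : pvScanA a pvTariffTable = some 5 := by
  simp only [pvTariffTable, pvScanA]
  rw [if_neg (by omega), if_neg (by omega), if_neg (by omega), if_neg (by omega), if_pos (by omega)]
theorem pvA_row5 (a : Int) (h : 1501 ≤ a ∧ a ≤ 2500) : pvScanA a pvTariffTable = some 9 := by
  simp only [pvTariffTable, pvScanA]
  rw [if_neg (by omega), if_neg (by omega), if_neg (by omega), if_neg (by omega), if_neg (by omega), if_pos (by omega)]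
theorem pvA_row6 (a : Int) (h : 2501 ≤ a ∧ a ≤ 3500) : pvScanA a pvTariffTable = some 9 := by
  simp only [pvTariffTable, pvScanA]
  rw [if_neg (by omega), if_neg (by omega), if_neg (by omega), if_neg (by omega), if_neg (by omega), if_neg (by omega), if_pos (by omega)]
theorem pvA_row7 (a : Int) (h : 3501 ≤ a ∧ a ≤ 5000) : pvScanA a pvTariffTable = some 9 := by
  simp only [pvTariffTable, pvScanA]
  rw [if_neg (by omega), if_neg (by omega), if_neg (by omega), if_neg (by omega), if_neg (by omega), if_neg (by omega), if_neg (by omega), if_pos (by omega)]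
theorem pvA_row8 (a : Int) (h : 5001 ≤ a ∧ a ≤ 7500) : pvScanA a pvTariffTable = some 11 := by
  simp only [pvTariffTable, pvScanA]
  rw [if_neg (by omega), if_neg (by omega), if_neg (by omega), if_neg (by omega), if_neg (by omega), if_neg (by omega), if_neg (by omega), if_neg (by omega), if_pos (by omega)]
theorem pvA_row9 (a : Int) (h : 7501 ≤ a ∧ a ≤ 10000) : pvScanA a pvTariffTable = some 11 := by
  simp only [pvTariffTable, pvScanA]
  rw [if_neg (by omega), if_neg (by omega), if_neg (by omega), if_neg (by omega), if_neg (by omega), if_neg (by omega), if_neg (by omega), if_neg (by omega), if_neg (by omega), if_pos (by omega)]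
theorem pvA_row10 (a : Int) (h : 10001 ≤ a ∧ a ≤ 15000) : pvScanA a pvTariffTable = some 11 := by
  simp only [pvTariffTable, pvScanA]
  rw [if_neg (by omega), if_neg (by omega), if_neg (by omega), if_neg (by omega), if_neg (by omega), if_neg (by omega), if_neg (by omega), if_neg (by omega), if_neg (by omega), if_neg (by omega), if_pos (by omega)]
theorem pvA_row11 (a : Int) (h : 15001 ≤ a ∧ a ≤ 20000) : pvScanA a pvTariffTable = some 11 := by
  simp only [pvTariffTable, pvScanA]
  rw [if_neg (by omega), if_neg (by omega), if_neg (by omega), if_neg (by omega), if_neg (by omega), if_neg (by omega), if_neg (by omega), if_neg (by omega), if_neg (by omega), if_neg (by omega), if_neg (by omega), if_pos (by omega)]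
theorem pvA_row12 (a : Int) (h : 20001 ≤ a ∧ a ≤ 25000) : pvScanA a pvTariffTable = some 13 := by
  simp only [pvTariffTable, pvScanA]
  rw [if_neg (by omega), if_neg (by omega), if_neg (by omega), if_neg (by omega), if_neg (by omega), if_neg (by omega), if_neg (by omega), if_neg (by omega), if_neg (by omega), if_neg (by omega), if_neg (by omega), if_neg (by omega), if_pos (by omega)]
theorem pvA_row13 (a : Int) (h : 25001 ≤ a ∧ a ≤ 30000) : pvScanA a pvTariffTable = some 13 := by
  simp only [pvTariffTable, pvScanA]
  rw [if_neg (by omega), if_neg (by omega), if_neg (by omega), if_neg (by omega), if_neg (by omega), if_neg (by omega), if_neg (by omega), if_neg (by omega), if_neg (by omega), if_neg (by omega), if_neg (by omega), if_neg (by omega), if_neg (by omega), if_pos (by omega)]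
theorem pvA_row14 (a : Int) (h : 30001 ≤ a ∧ a ≤ 35000) : pvScanA a pvTariffTable = some 13 := by
  simp only [pvTariffTable, pvScanA]
  rw [if_neg (by omega), if_neg (by omega), if_neg (by omega), if_neg (by omega), if_neg (by omega), if_neg (by omega), if_neg (by omega), if_neg (by omega), if_neg (by omega), if_neg (by omega), if_neg (by omega), if_neg (by omega), if_neg (by omega), if_neg (by omega), if_pos (by omega)]
theorem pvA_row15 (a : Int) (h : 35001 ≤ a ∧ a ≤ 40000) : pvScanA a pvTariffTable = some 13 := by
  simp only [pvTariffTable, pvScanA]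
  rw [if_neg (by omega), if_neg (by omega), if_neg (by omega), if_neg (by omega), if_neg (by omega), if_neg (by omega), if_neg (by omega), if_neg (by omega), if_neg (by omega), if_neg (by omega), if_neg (by omega), if_neg (by omega), if_neg (by omega), if_neg (by omega), if_neg (by omega), if_pos (by omega)]
theorem pvA_row16 (a : Int) (h : 40001 ≤ a ∧ a ≤ 45000) : pvScanA a pvTariffTable = some 13 := by
  simp only [pvTariffTable, pvScanA]
  rw [if_neg (by omega), if_neg (by omega), if_neg (by omega), if_neg (by omega), if_neg (by omega), if_neg (by omega), if_neg (by omega), if_neg (by omega), if_neg (by omega), if_neg (by omega), if_neg (by omega), if_neg (by omega), if_neg (by omega), if_neg (by omega), if_neg (by omega), if_neg (by omega), if_pos (by omega)]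
theorem pvA_row17 (a : Int) (h : 45001 ≤ a ∧ a ≤ 50000) : pvScanA a pvTariffTable = some 13 := by
  simp only [pvTariffTable, pvScanA]
  rw [if_neg (by omega), if_neg (by omega), if_neg (by omega), if_neg (by omega), if_neg (by omega), if_neg (by omega), if_neg (by omega), if_neg (by omega), if_neg (by omega), if_neg (by omega), if_neg (by omega), if_neg (by omega), if_neg (by omega), if_neg (by omega), if_neg (by omega), if_neg (by omega), if_neg (by omega), if_pos (by omega)]
theorem pvA_row18 (a : Int) (h : 50001 ≤ a ∧ a ≤ 70000) : pvScanA a pvTariffTable = some 13 := by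
  simp only [pvTariffTable, pvScanA]
  rw [if_neg (by omega), if_neg (by omega), if_neg (by omega), if_neg (by omega), if_neg (by omega), if_neg (by omega), if_neg (by omega), if_neg (by omega), if_neg (by omega), if_neg (by omega), if_neg (by omega), if_neg (by omega), if_neg (by omega), if_neg (by omega), if_neg (by omega), if_neg (by omega), if_neg (by omega), if_neg (by omega), if_pos (by omega)]
theorem pvA_row19 (a : Int) (h : 70001 ≤ a ∧ a ≤ 250000) : pvScanA a pvTariffTable = some 13 := by
  simp only [pvTariffTable, pvScanA]
  rw [if_neg (by omega), if_neg (by omega), if_neg (by omega), if_neg (by omega), if_neg (by omega), if_neg (by omega), if_neg (by omega), if_neg (by omega), if_neg (by omega), if_neg (by omega), if_neg (by omega), if_neg (by omega), if_neg (by omega), if_neg (by omega), if_neg (by omega), if_neg (by omega), if_neg (by omega), if_neg (by omega), if_neg (by omega), if_pos (by omega)]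
theorem pvA_none_low (a : Int) (h : a ≤ 0) : pvScanA a pvTariffTable = none := by
  simp only [pvTariffTable, pvScanA]
  rw [if_neg (by omega), if_neg (by omega), if_neg (by omega), if_neg (by omega), if_neg (by omega), if_neg (by omega), if_neg (by omega), if_neg (by omega), if_neg (by omega), if_neg (by omega), if_neg (by omega), if_neg (by omega), if_neg (by omega), if_neg (by omega), if_neg (by omega), if_neg (by omega), if_neg (by omega), if_neg (by omega), if_neg (by omega), if_neg (by omega)]
theorem pvA_none_high (a : Int) (h : 250001 ≤ a) : pvScanA a pvTariffTable = none := by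
  simp only [pvTariffTable, pvScanA]
  rw [if_neg (by omega), if_neg (by omega), if_neg (by omega), if_neg (by omega), if_neg (by omega), if_neg (by omega), if_neg (by omega), if_neg (by omega), if_neg (by omega), if_neg (by omega), if_neg (by omega), if_neg (by omega), if_neg (by omega), if_neg (by omega), if_neg (by omega), if_neg (by omega), if_neg (by omega), if_neg (by omega), if_neg (by omega), if_neg (by omega)]
-- evaluation lemmas for B's binary search: one per merged fee region
theorem pvBisect_r0 (a : Int) (h : a ≤ 100) : pvBisect a 0 4 = 0 := by
  rw [pvBisect]; norm_num [pvBounds]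
  rw [if_neg (by omega), pvBisect]; norm_num [pvBounds]
  rw [if_neg (by omega), pvBisect]; norm_num [pvBounds]
  rw [if_neg (by omega), pvBisect, dif_neg (by omega)]

theorem pvBisect_r1 (a : Int) (h : 101 ≤ a ∧ a ≤ 1500) : pvBisect a 0 4 = 1 := by
  rw [pvBisect]; norm_num [pvBounds]
  rw [if_neg (by omega), pvBisect]; norm_num [pvBounds]
  rw [if_neg (by omega), pvBisect]; norm_num [pvBounds]
  rw [if_pos (by omega), pvBisect, dif_neg (by omega)]

theorem pvBisect_r2 (a : Int) (h : 1501 ≤ a ∧ a ≤ 5000) : pvBisect a 0 4 = 2 := by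
  rw [pvBisect]; norm_num [pvBounds]
  rw [if_neg (by omega), pvBisect]; norm_num [pvBounds]
  rw [if_pos (by omega), pvBisect, dif_neg (by omega)]

theorem pvBisect_r3 (a : Int) (h : 5001 ≤ a ∧ a ≤ 20000) : pvBisect a 0 4 = 3 := by
  rw [pvBisect]; norm_num [pvBounds]
  rw [if_pos (by omega), pvBisect]; norm_num [pvBounds]
  rw [if_neg (by omega), pvBisect, dif_neg (by omega)]

theorem pvBisect_r4 (a : Int) (h : 20001 ≤ a) : pvBisect a 0 4 = 4 := by
  rw [pvBisect]; norm_num [pvBounds]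
  rw [if_pos (by omega), pvBisect]; norm_num [pvBounds]
  rw [if_pos (by omega), pvBisect, dif_neg (by omega)]

-- ===== VERDICT (by name: the statement is the Claim_ definition above) =====
theorem calculate_b2c_charge_spec : Claim_equal_calculate_b2c_charge := by
  intro a _
  unfold Spec_calculate_b2c_charge calculate_b2c_charge calculate_b2c_charge_alt
  by_cases h0 : a < 1
  · rw [if_pos (Or.inl h0), pvA_none_low a (by omega)]
  by_cases hN : a > 250000
  · rw [if_pos (Or.inr hN), pvA_none_high a (by omega)]
  rw [if_neg (by omega)]
  by_cases h1 : a ≤ 49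
  · rw [pvA_row0 a (by omega), pvBisect_r0 a (by omega)]; rfl
  by_cases h2 : a ≤ 100
  · rw [pvA_row1 a (by omega), pvBisect_r0 a (by omega)]; rfl
  by_cases h3 : a ≤ 500
  · rw [pvA_row2 a (by omega), pvBisect_r1 a (by omega)]; rfl
  by_cases h4 : a ≤ 1000
  · rw [pvA_row3 a (by omega), pvBisect_r1 a (by omega)]; rfl
  by_cases h5 : a ≤ 1500
  · rw [pvA_row4 a (by omega), pvBisect_r1 a (by omega)]; rfl
  by_cases h6 : a ≤ 2500
  · rw [pvA_row5 a (by omega), pvBisect_r2 a (by omega)]; rfl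
  by_cases h7 : a ≤ 3500
  · rw [pvA_row6 a (by omega), pvBisect_r2 a (by omega)]; rfl
  by_cases h8 : a ≤ 5000
  · rw [pvA_row7 a (by omega), pvBisect_r2 a (by omega)]; rfl
  by_cases h9 : a ≤ 7500
  · rw [pvA_row8 a (by omega), pvBisect_r3 a (by omega)]; rfl
  by_cases h10 : a ≤ 10000
  · rw [pvA_row9 a (by omega), pvBisect_r3 a (by omega)]; rfl
  by_cases h11 : a ≤ 15000
  · rw [pvA_row10 a (by omega), pvBisect_r3 a (by omega)]; rfl
  by_cases h12 : a ≤ 20000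
  · rw [pvA_row11 a (by omega), pvBisect_r3 a (by omega)]; rfl
  by_cases h13 : a ≤ 25000
  · rw [pvA_row12 a (by omega), pvBisect_r4 a (by omega)]; rfl
  by_cases h14 : a ≤ 30000
  · rw [pvA_row13 a (by omega), pvBisect_r4 a (by omega)]; rfl
  by_cases h15 : a ≤ 35000
  · rw [pvA_row14 a (by omega), pvBisect_r4 a (by omega)]; rfl
  by_cases h16 : a ≤ 40000
  · rw [pvA_row15 a (by omega), pvBisect_r4 a (by omega)]; rfl
  by_cases h17 : a ≤ 45000
  · rw [pvA_row16 a (by omega), pvBisect_r4 a (by omega)]; rfl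
  by_cases h18 : a ≤ 50000
  · rw [pvA_row17 a (by omega), pvBisect_r4 a (by omega)]; rfl
  by_cases h19 : a ≤ 70000
  · rw [pvA_row18 a (by omega), pvBisect_r4 a (by omega)]; rfl
  rw [pvA_row19 a (by omega), pvBisect_r4 a (by omega)]; rfl
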